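-- pv_equiv track=rewrite | github.com/mickume/podtext | src/podtext/core/processor.py | _normalize_ad_blocks
-- ===== SOURCE A (Python) =====
-- def _normalize_ad_blocks(
--     ad_positions: list[tuple[int, int]],
--     text_length: int,
-- ) -> list[tuple[int, int]]:
--     """Normalize and merge overlapping/adjacent advertisement blocks.
--
--     This function:
--     1. Filters out invalid positions (negative, out of bounds, empty ranges)
--     2. Clamps positions to valid text bounds
--     3. Sorts blocks by start position
--     4. Merges overlapping or adjacent blocks
--
--     Args:
--         ad_positions: List of (start, end) tuples for advertisement positions.
--         text_length: Length of the text being processed.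
--
--     Returns:
--         Normalized list of non-overlapping (start, end) tuples, sorted by start.
--     """
--     if not ad_positions or text_length <= 0:
--         return []
--
--     # Filter and clamp positions
--     valid_blocks: list[tuple[int, int]] = []
--     for start, end in ad_positions:
--         # Skip invalid ranges
--         if start >= end:
--             continue
--         if start >= text_length:
--             continue
--         if end <= 0:
--             continue
--
--         # Clamp to valid bounds
--         clamped_start = max(0, start)
--         clamped_end = min(text_length, end)
--
--         # Only add if still valid after clamping
--         if clamped_start < clamped_end:
--             valid_blocks.append((clamped_start, clamped_end))
--
--     if not valid_blocks:
--         return []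
--
--     # Sort by start position
--     valid_blocks.sort(key=lambda x: x[0])
--
--     # Merge overlapping/adjacent blocks
--     merged: list[tuple[int, int]] = []
--     current_start, current_end = valid_blocks[0]
--
--     for start, end in valid_blocks[1:]:
--         if start <= current_end:
--             # Overlapping or adjacent - extend current block
--             current_end = max(current_end, end)
--         else:
--             # Gap between blocks - save current and start new
--             merged.append((current_start, current_end))
--             current_start, current_end = start, end
--
--     # Don't forget the last block
--     merged.append((current_start, current_end))
--
--     return merged
-- ===== SOURCE B (Python) =====
-- def _normalize_ad_blocks(
--     ad_positions: list[tuple[int, int]],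
--     text_length: int,
-- ) -> list[tuple[int, int]]:
--     if text_length <= 0:
--         return []
--     # filter + clamp in one comprehension (for s < e, s < text_length, 0 < e and
--     # text_length > 0, the clamped pair is automatically non-empty), then sort by start
--     valid = sorted(
--         [(max(0, s), min(text_length, e))
--          for s, e in ad_positions
--          if s < e and s < text_length and 0 < e],
--         key=lambda x: x[0],
--     )
--     # merge by walking the sorted blocks RIGHT-TO-LEFT with a monotonic stack:
--     # absorb every stacked interval whose start is <= the current end
--     out: list[tuple[int, int]] = []
--     for s, e in reversed(valid):
--         while out and out[-1][0] <= e: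
--             e = max(e, out[-1][1])
--             out.pop()
--         out.append((s, e))
--     out.reverse()
--     return out
-- ===== Notes on version B (the rewrite author's own statement) =====
-- stated objective: alternative
-- what changed: B replaces A's filter loop + in-place sort + forward current-interval merge loop by a filter/clamp comprehension, one sorted() call, and a right-to-left monotonic-stack merge that absorbs stacked intervals whose start lies at or below the current end.
import Mathlib
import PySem

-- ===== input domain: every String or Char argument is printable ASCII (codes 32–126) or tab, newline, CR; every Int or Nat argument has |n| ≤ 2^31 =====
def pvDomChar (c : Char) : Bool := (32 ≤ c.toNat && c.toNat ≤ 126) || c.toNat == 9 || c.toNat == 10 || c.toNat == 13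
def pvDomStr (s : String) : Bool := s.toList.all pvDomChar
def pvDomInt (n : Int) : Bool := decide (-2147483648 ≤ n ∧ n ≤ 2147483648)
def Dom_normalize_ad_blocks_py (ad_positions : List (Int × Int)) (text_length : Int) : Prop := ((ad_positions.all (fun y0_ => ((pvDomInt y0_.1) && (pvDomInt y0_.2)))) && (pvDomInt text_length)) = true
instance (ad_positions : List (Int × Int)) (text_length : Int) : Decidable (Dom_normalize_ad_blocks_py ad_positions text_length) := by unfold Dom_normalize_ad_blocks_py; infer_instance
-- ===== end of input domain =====

-- B merges with a right-to-left monotonic-stack absorption instead of A's forward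
-- current-interval loop, and filters/clamps in one comprehension (alternative algorithm,
-- same asymptotic cost); return values proved equal on all inputs.

-- ===== PORT A =====
def normalize_ad_blocks_py (ad_positions : List (Int × Int)) (text_length : Int) : List (Int × Int) :=
  if ad_positions = [] ∨ text_length ≤ 0 then []
  else
    -- filter-and-clamp loop
    let valid_blocks := ad_positions.foldl (fun acc p =>
      if p.1 ≥ p.2 then acc
      else if p.1 ≥ text_length then acc
      else if p.2 ≤ 0 then acc
      else
        let clamped_start := max 0 p.1
        let clamped_end := min text_length p.2
        if clamped_start < clamped_end then acc ++ [(clamped_start, clamped_end)] else acc) []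
    if valid_blocks = [] then []
    else
      -- valid_blocks.sort(key=lambda x: x[0])
      let sb := PySem.List.sorted valid_blocks (fun x => x.1) false
      -- current_start, current_end = sb[0]; loop over sb[1:]  (sb ≠ [] by the guard above)
      match sb with
      | [] => []
      | (cs0, ce0) :: rest =>
        let fin := rest.foldl (fun (st : List (Int × Int) × Int × Int) p =>
          if p.1 ≤ st.2.2 then (st.1, st.2.1, max st.2.2 p.2)
          else (st.1 ++ [(st.2.1, st.2.2)], p.1, p.2)) (([] : List (Int × Int)), cs0, ce0)
        fin.1 ++ [(fin.2.1, fin.2.2)]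

-- ===== PORT B =====
-- Source B's inner `while` loop: absorb stacked intervals whose start is <= the current end
def pvAbsorb : Int → Int → List (Int × Int) → List (Int × Int)
  | s, e, [] => [(s, e)]
  | s, e, (hs, he) :: t => if hs ≤ e then pvAbsorb s (max e he) t else (s, e) :: (hs, he) :: t

def normalize_ad_blocks_py_alt (ad_positions : List (Int × Int)) (text_length : Int) : List (Int × Int) :=
  if text_length ≤ 0 then []
  else
    let valid := PySem.List.sorted
      ((ad_positions.filter (fun p => decide (p.1 < p.2) && decide (p.1 < text_length) && decide (0 < p.2))).map
        (fun p => (max 0 p.1, min text_length p.2)))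
      (fun x => x.1) false
    -- Source B's `for s, e in reversed(valid)` stack loop; the top of Python's `out`
    -- (= out[-1]) is the HEAD here, so reversed-iteration-with-push is foldr and
    -- Source B's final out.reverse() is the identity in this head-first model
    valid.foldr (fun p out => pvAbsorb p.1 p.2 out) []

-- ===== PRECONDITION & SPEC =====
def Spec_normalize_ad_blocks_py (ad_positions : List (Int × Int)) (text_length : Int) (out : List (Int × Int)) : Prop := out = normalize_ad_blocks_py_alt ad_positions text_length
instance (ad_positions : List (Int × Int)) (text_length : Int) (out : List (Int × Int)) : Decidable (Spec_normalize_ad_blocks_py ad_positions text_length out) := by unfold Spec_normalize_ad_blocks_py; infer_instance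

-- ===== CLAIM (what is proved, stated in full; the proofs are below) =====
def Claim_equal_normalize_ad_blocks_py : Prop := ∀ (ad_positions : List (Int × Int)) (text_length : Int), Dom_normalize_ad_blocks_py ad_positions text_length → Spec_normalize_ad_blocks_py ad_positions text_length (normalize_ad_blocks_py ad_positions text_length)

-- ===== LEMMAS AND PROOFS =====

-- A's merge loop as a structural recursion on the remaining blocks
def pvGo : Int → Int → List (Int × Int) → List (Int × Int)
  | cs, ce, [] => [(cs, ce)]
  | cs, ce, (s, e) :: t => if s ≤ ce then pvGo cs (max ce e) t else (cs, ce) :: pvGo s e t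

-- A's foldl merge state, flushed, is pvGo
theorem pvFoldA_eq_go (rest : List (Int × Int)) : ∀ (acc : List (Int × Int)) (cs ce : Int),
    (let fin := rest.foldl (fun (st : List (Int × Int) × Int × Int) p =>
        if p.1 ≤ st.2.2 then (st.1, st.2.1, max st.2.2 p.2)
        else (st.1 ++ [(st.2.1, st.2.2)], p.1, p.2)) (acc, cs, ce)
     fin.1 ++ [(fin.2.1, fin.2.2)])
    = acc ++ pvGo cs ce rest := by
  induction rest with
  | nil => intro acc cs ce; simp [pvGo]
  | cons p t ih =>
    intro acc cs ce
    obtain ⟨s, e⟩ := p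
    by_cases h : s ≤ ce
    · simp only [List.foldl_cons, pvGo, h]
      exact ih acc cs (max ce e)
    · simp only [List.foldl_cons, pvGo, if_neg h]
      rw [ih (acc ++ [(cs, ce)]) s e]
      simp

-- pvAbsorb always returns a list headed by its first argument's start
theorem pvAbsorb_head (M : List (Int × Int)) : ∀ (s e : Int), ∃ X Y, pvAbsorb s e M = (s, X) :: Y := by
  induction M with
  | nil => intro s e; exact ⟨e, [], rfl⟩
  | cons q t ih =>
    intro s e
    obtain ⟨hs, he⟩ := q
    by_cases h : hs ≤ e
    · simpa [pvAbsorb, h] using ih s (max e he)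
    · exact ⟨e, (hs, he) :: t, by simp [pvAbsorb, h]⟩

-- absorbing twice with a mergeable head is one absorption with the maxed end
theorem pvAbsorb_absorb (M : List (Int × Int)) : ∀ (cs ce s e : Int), s ≤ ce →
    pvAbsorb cs ce (pvAbsorb s e M) = pvAbsorb cs (max ce e) M := by
  induction M with
  | nil => intro cs ce s e h; simp [pvAbsorb, h]
  | cons q t ih =>
    intro cs ce s e h
    obtain ⟨hs, he⟩ := q
    by_cases h2 : hs ≤ e
    · rw [show pvAbsorb s e ((hs, he) :: t) = pvAbsorb s (max e he) t by simp [pvAbsorb, h2],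
        ih cs ce s (max e he) h]
      have h3 : hs ≤ max ce e := le_trans h2 (le_max_right _ _)
      simp [pvAbsorb, h3, max_assoc]
    · rw [show pvAbsorb s e ((hs, he) :: t) = (s, e) :: (hs, he) :: t by simp [pvAbsorb, h2]]
      simp [pvAbsorb, h, h2]

-- A's merge recursion equals B's backward stack fold — on EVERY block list
theorem pvGo_eq_foldr (t : List (Int × Int)) : ∀ (cs ce : Int),
    pvGo cs ce t = pvAbsorb cs ce (t.foldr (fun p out => pvAbsorb p.1 p.2 out) []) := by
  induction t with
  | nil => intro cs ce; simp [pvGo, pvAbsorb]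
  | cons q t' ih =>
    intro cs ce
    obtain ⟨s, e⟩ := q
    by_cases h : s ≤ ce
    · rw [show pvGo cs ce ((s, e) :: t') = pvGo cs (max ce e) t' by simp [pvGo, h], ih,
        List.foldr_cons]
      exact (pvAbsorb_absorb _ cs ce s e h).symm
    · rw [show pvGo cs ce ((s, e) :: t') = (cs, ce) :: pvGo s e t' by simp [pvGo, h], ih,
        List.foldr_cons]
      obtain ⟨X, Y, hXY⟩ := pvAbsorb_head (t'.foldr (fun p out => pvAbsorb p.1 p.2 out) []) s e
      rw [hXY]
      simp [pvAbsorb, h]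

-- A's filter-and-clamp loop equals B's filter + map (for positive text_length)
theorem pvFilter_eq (tl : Int) (htl : 0 < tl) (ap : List (Int × Int)) : ∀ (acc : List (Int × Int)),
    ap.foldl (fun acc p =>
      if p.1 ≥ p.2 then acc
      else if p.1 ≥ tl then acc
      else if p.2 ≤ 0 then acc
      else
        let clamped_start := max 0 p.1
        let clamped_end := min tl p.2
        if clamped_start < clamped_end then acc ++ [(clamped_start, clamped_end)] else acc) acc
    = acc ++ (ap.filter (fun p => decide (p.1 < p.2) && decide (p.1 < tl) && decide (0 < p.2))).map
        (fun p => (max 0 p.1, min tl p.2)) := by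
  induction ap with
  | nil => intro acc; simp
  | cons p t ih =>
    intro acc
    obtain ⟨s, e⟩ := p
    simp only [List.foldl_cons, List.filter_cons]
    by_cases hp : s < e ∧ s < tl ∧ 0 < e
    · have hc : max 0 s < min tl e := by omega
      have : (decide (s < e) && decide (s < tl) && decide (0 < e)) = true := by
        simp [hp.1, hp.2.1, hp.2.2]
      simp only [this, if_true]
      rw [show (if s ≥ e then acc else if s ≥ tl then acc else if e ≤ 0 then acc
            else if max 0 s < min tl e then acc ++ [(max 0 s, min tl e)] else acc)
          = acc ++ [(max 0 s, min tl e)] by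
        split_ifs <;> first | rfl | omega]
      rw [ih (acc ++ [(max 0 s, min tl e)])]
      simp
    · have : (decide ((s, e).1 < (s, e).2) && decide ((s, e).1 < tl) && decide (0 < (s, e).2)) = false := by
        simp only [Bool.and_eq_false_iff, decide_eq_false_iff_not]
        omega
      simp only [this, Bool.false_eq_true, if_false]
      rw [show (if s ≥ e then acc else if s ≥ tl then acc else if e ≤ 0 then acc
            else if max 0 s < min tl e then acc ++ [(max 0 s, min tl e)] else acc) = acc by
        split_ifs <;> first | rfl | omega]
      exact ih acc

-- ===== VERDICT (by name: the statement is the Claim_ definition above) =====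
theorem normalize_ad_blocks_py_spec : Claim_equal_normalize_ad_blocks_py := by
  intro ap tl _
  unfold Spec_normalize_ad_blocks_py normalize_ad_blocks_py normalize_ad_blocks_py_alt
  by_cases htl : tl ≤ 0
  · simp [htl]
  · have htl' : 0 < tl := by omega
    simp only [htl, if_false, or_false]
    rw [pvFilter_eq tl htl' ap []]
    simp only [List.nil_append]
    set V := (ap.filter (fun p => decide (p.1 < p.2) && decide (p.1 < tl) && decide (0 < p.2))).map
        (fun p => (max 0 p.1, min tl p.2)) with hV
    by_cases hap : ap = []
    · subst hap
      simp [hV, PySem.List.sorted]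
    · simp only [hap, if_false]
      by_cases hVe : V = []
      · simp [hVe, PySem.List.sorted]
      · simp only [hVe, if_false]
        have hs : PySem.List.sorted V (fun x => x.1) false ≠ [] := by
          simpa [PySem.List.sorted_eq_nil_iff] using hVe
        obtain ⟨⟨cs0, ce0⟩, rest, hrest⟩ := List.exists_cons_of_ne_nil hs
        rw [hrest]
        exact (pvFoldA_eq_go rest [] cs0 ce0).trans (pvGo_eq_foldr rest cs0 ce0)
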